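-- pv_equiv track=rewrite | github.com/prosk-sudo/Coding-exercises | Codeforces/100 Problems A/LLPS_unfinished.py | llps
-- ===== SOURCE A (Python) =====
-- def llps(s):
--     answer = ""
--     max = "a"
--     for i in range(len(s)):
--         if s[i] > max:
--             max = s[i]
--     for i in range(len(s)):
--         if s[i] == max:
--             answer += s[i]
--     return answer
-- ===== SOURCE B (Python) =====
-- def llps(s):
--     # One pass: track the best character seen (floored at "a") and its running count.
--     best, count = "a", 0
--     for ch in s:
--         if ch > best:
--             best, count = ch, 1
--         elif ch == best:
--             count += 1
--     return best * count
-- ===== Notes on version B (the rewrite author's own statement) =====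
-- stated objective: faster
-- what changed: Replaces A's two passes (find max char, then re-scan concatenating matching chars one by one) with a single pass keeping the best character and its running count, returning best * count at the end.
import Mathlib
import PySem

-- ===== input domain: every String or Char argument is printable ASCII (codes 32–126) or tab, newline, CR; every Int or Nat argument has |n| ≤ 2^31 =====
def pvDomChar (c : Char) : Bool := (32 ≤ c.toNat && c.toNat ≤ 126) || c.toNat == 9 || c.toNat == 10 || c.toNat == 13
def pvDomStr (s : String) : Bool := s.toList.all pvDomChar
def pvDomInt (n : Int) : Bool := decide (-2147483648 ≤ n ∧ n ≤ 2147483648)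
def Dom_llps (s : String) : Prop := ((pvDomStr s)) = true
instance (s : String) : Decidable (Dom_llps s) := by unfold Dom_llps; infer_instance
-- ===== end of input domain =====

-- B replaces A's two passes with a single pass keeping the best char and its running count (objective: simpler).

-- ===== PORT A =====
-- Python compares one-char strings s[i] > max by code point, which is Char's < here.
def llps (s : String) : String :=
  let m := s.toList.foldl (fun mx c => if mx < c then c else mx) 'a'
  let answer := s.toList.foldl (fun a c => if c == m then a ++ [c] else a) ([] : List Char)
  String.mk answer

-- ===== PORT B =====
def llps_alt (s : String) : String :=
  let r := s.toList.foldl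
    (fun (st : Char × Nat) c =>
      if st.1 < c then (c, 1)
      else if c == st.1 then (st.1, st.2 + 1)
      else st) ('a', 0)
  String.mk (List.replicate r.2 r.1)

-- ===== PRECONDITION & SPEC =====
def Spec_llps (s : String) (out : String) : Prop := out = llps_alt s
instance (s : String) (out : String) : Decidable (Spec_llps s out) := by unfold Spec_llps; infer_instance

-- ===== CLAIM (what is proved, stated in full; the proofs are below) =====
def Claim_equal_llps : Prop := ∀ (s : String), Dom_llps s → Spec_llps s (llps s)

-- ===== LEMMAS AND PROOFS =====

-- the fold in A's first pass only grows its accumulator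
theorem le_maxFold (l : List Char) (b : Char) :
    b ≤ l.foldl (fun mx c => if mx < c then c else mx) b := by
  induction l generalizing b with
  | nil => exact le_refl _
  | cons c l ih =>
    simp only [List.foldl_cons]
    split
    · exact le_of_lt (lt_of_lt_of_le (by assumption) (ih c))
    · exact ih b

-- invariant of B's single pass: it computes A's max together with its count
theorem stateFold_spec (l : List Char) (b : Char) (k : ℕ) :
    l.foldl
      (fun (st : Char × Nat) c =>
        if st.1 < c then (c, 1)
        else if c == st.1 then (st.1, st.2 + 1)
        else st) (b, k)
    = (l.foldl (fun mx c => if mx < c then c else mx) b,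
       (if l.foldl (fun mx c => if mx < c then c else mx) b = b then k else 0)
         + l.count (l.foldl (fun mx c => if mx < c then c else mx) b)) := by
  induction l generalizing b k with
  | nil => simp
  | cons c l ih =>
    simp only [List.foldl_cons, List.count_cons]
    by_cases hbc : b < c
    · simp only [if_pos hbc]
      rw [ih c 1]
      have hM : c ≤ l.foldl (fun mx c => if mx < c then c else mx) c := le_maxFold l c
      have hMb : l.foldl (fun mx c => if mx < c then c else mx) c ≠ b := by
        intro h; rw [h] at hM; exact absurd hbc (not_lt_of_ge hM)
      simp only [if_neg hMb]
      by_cases hMc : l.foldl (fun mx c => if mx < c then c else mx) c = c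
      · simp [hMc]; omega
      · have : (c == l.foldl (fun mx c => if mx < c then c else mx) c) = false := by
          simp only [beq_eq_false_iff_ne, ne_eq]; exact fun h => hMc h.symm
        simp [hMc, this]
    · simp only [if_neg hbc]
      by_cases hcb : c = b
      · subst hcb
        simp only [beq_self_eq_true, if_pos]
        rw [ih c (k + 1)]
        by_cases hM : l.foldl (fun mx c => if mx < c then c else mx) c = c
        · simp [hM]; omega
        · have : (c == l.foldl (fun mx c => if mx < c then c else mx) c) = false := by
            simp only [beq_eq_false_iff_ne, ne_eq]; exact fun h => hM h.symm
          simp [hM, this]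
      · have hne : (c == b) = false := by simp only [beq_eq_false_iff_ne, ne_eq]; exact hcb
        simp only [hne, Bool.false_eq_true, if_false]
        rw [ih b k]
        have hbM : b ≤ l.foldl (fun mx c => if mx < c then c else mx) b := le_maxFold l b
        have hcM : c ≠ l.foldl (fun mx c => if mx < c then c else mx) b := by
          intro h
          have : c < b := lt_of_le_of_ne (le_of_not_gt hbc) hcb
          rw [h] at this; exact absurd (lt_of_lt_of_le this hbM) (lt_irrefl _)
        have : (c == l.foldl (fun mx c => if mx < c then c else mx) b) = false := by
          simp only [beq_eq_false_iff_ne, ne_eq]; exact hcM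
        simp [this]

-- ===== VERDICT (by name: the statement is the Claim_ definition above) =====
theorem llps_spec : Claim_equal_llps := by
  intro s _
  unfold Spec_llps llps llps_alt
  rw [stateFold_spec]
  simp only []
  set l := s.toList with hl
  set M := l.foldl (fun mx c => if mx < c then c else mx) 'a' with hM
  have hfilter : l.foldl (fun a c => if c == M then a ++ [c] else a) ([] : List Char)
      = l.filter (· == M) := PySem.List.foldl_append_if_eq_filter (p := (· == M)) l []
  rw [hfilter, List.filter_beq]
  by_cases h : M = 'a' <;> simp [h]
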